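-- pv_equiv track=rewrite | github.com/DeepKungChannel/harvestcraft | backend/module/level/calculate.py | get_required_xp
-- ===== SOURCE A (Python) =====
-- def get_required_xp(level):
--     levels = sorted(levelXptables.keys())
--
--     # If the level exists in the table, return its corresponding XP value
--     if level in levelXptables:
--         return levelXptables[level]
--
--     # Find the highest level lower than the given level
--     for l in reversed(levels):
--         if l < level:
--             return levelXptables[l]
--
--     # If no lower level is found, return None or an appropriate default value
--     return None
--
-- levelXptables = {
--     0: 5,
--     1: 10,
--     2: 15,
--     3: 20,
--     4: 25,
--     5: 30
-- }
-- ===== SOURCE B (Python) =====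
-- levelXptables = {
--     0: 5,
--     1: 10,
--     2: 15,
--     3: 20,
--     4: 25,
--     5: 30
-- }
--
-- _SORTED_LEVELS = sorted(levelXptables)
--
-- def get_required_xp(level):
--     # hand-written bisect_right over the precomputed sorted key list
--     lo, hi = 0, len(_SORTED_LEVELS)
--     while lo < hi:
--         mid = (lo + hi) // 2
--         if _SORTED_LEVELS[mid] <= level:
--             lo = mid + 1
--         else:
--             hi = mid
--     if lo == 0:
--         return None
--     return levelXptables[_SORTED_LEVELS[lo - 1]]
-- ===== Notes on version B (the rewrite author's own statement) =====
-- stated objective: idiomatic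
-- what changed: Replaced the dict-membership check plus reverse linear scan over the sorted keys with a single bisect_right-style binary search on the precomputed sorted key list, unifying the exact-key and nearest-lower cases in one lookup.
import Mathlib
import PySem

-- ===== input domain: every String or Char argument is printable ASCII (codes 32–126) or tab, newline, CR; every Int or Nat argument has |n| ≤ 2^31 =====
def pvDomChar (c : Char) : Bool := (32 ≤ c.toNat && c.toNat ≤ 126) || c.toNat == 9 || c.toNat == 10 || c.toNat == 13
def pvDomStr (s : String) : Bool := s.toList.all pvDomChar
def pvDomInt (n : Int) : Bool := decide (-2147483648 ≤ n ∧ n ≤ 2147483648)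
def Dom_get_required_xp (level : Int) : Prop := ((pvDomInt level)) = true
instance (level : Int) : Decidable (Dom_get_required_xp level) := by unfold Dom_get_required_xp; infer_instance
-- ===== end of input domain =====

-- B replaces A's dict-membership check plus reverse linear scan with one hand-written
-- bisect_right binary search over the precomputed sorted key list (objective: idiomatic).

-- ===== PORT A =====
def levelXptables : PySem.Dict Int Int :=
  PySem.Dict.mk [(0, 5), (1, 10), (2, 15), (3, 20), (4, 25), (5, 30)]

def get_required_xp (level : Int) : Option Int :=
  let levels := PySem.List.sorted (PySem.Dict.keys levelXptables) (fun x => x) false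
  if levelXptables.contains level then
    PySem.Dict.get? levelXptables level
  else
    -- for l in reversed(levels): if l < level: return levelXptables[l]; after the loop: None
    levels.reverse.findSome? (fun l => if l < level then PySem.Dict.get? levelXptables l else none)

-- ===== PORT B =====
-- _SORTED_LEVELS = sorted(levelXptables)
def sortedLevels : List Int := PySem.List.sorted levelXptables.keys (fun x => x) false

-- Source B's 'while lo < hi' bisect_right loop; fuel = initial hi bounds the iteration count
-- (hi - lo shrinks every step), so the recursion is structural and exact.
def bisR (x : Int) : Nat → Nat → Nat → Nat
  | 0, lo, _ => lo
  | fuel + 1, lo, hi =>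
    if lo < hi then
      let mid := (lo + hi) / 2
      if sortedLevels.getD mid 0 ≤ x then bisR x fuel (mid + 1) hi else bisR x fuel lo mid
    else lo

def get_required_xp_alt (level : Int) : Option Int :=
  let n := sortedLevels.length
  let lo := bisR level n 0 n
  if lo = 0 then none
  else PySem.Dict.get? levelXptables (sortedLevels.getD (lo - 1) 0)

-- ===== PRECONDITION & SPEC =====
def Spec_get_required_xp (level : Int) (out : Option Int) : Prop := out = get_required_xp_alt level
instance (level : Int) (out : Option Int) : Decidable (Spec_get_required_xp level out) := by unfold Spec_get_required_xp; infer_instance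

-- ===== CLAIM (what is proved, stated in full; the proofs are below) =====
def Claim_equal_get_required_xp : Prop := ∀ (level : Int), Dom_get_required_xp level → Spec_get_required_xp level (get_required_xp level)

-- ===== LEMMAS AND PROOFS =====
-- Both programs depend only on where level falls relative to the keys 0..5: the two
-- unbounded intervals are handled symbolically, the middle six levels by computation.
lemma skeys : sortedLevels = [0,1,2,3,4,5] := by decide

lemma ge_five_a (level : Int) (h : 5 < level) : get_required_xp level = some 30 := by
  have a0 : ¬ ((0:Int) = level) := by omega
  have a1 : ¬ ((1:Int) = level) := by omega
  have a2 : ¬ ((2:Int) = level) := by omega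
  have a3 : ¬ ((3:Int) = level) := by omega
  have a4 : ¬ ((4:Int) = level) := by omega
  have a5 : ¬ ((5:Int) = level) := by omega
  simp [get_required_xp, levelXptables, PySem.Dict.contains, PySem.Dict.get?, PySem.Dict.keys,
        PySem.List.sorted, PySem.List.insertBy, List.findSome?, a0,a1,a2,a3,a4,a5, h]

lemma ge_five_b (level : Int) (h : 5 < level) : get_required_xp_alt level = some 30 := by
  have k3 : ((3:Int) ≤ level) := by omega
  have k5 : ((5:Int) ≤ level) := by omega
  simp [get_required_xp_alt, bisR, skeys, k3, k5, levelXptables, PySem.Dict.get?]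

lemma lt_zero_a (level : Int) (h : level < 0) : get_required_xp level = none := by
  have a0 : ¬ ((0:Int) = level) := by omega
  have a1 : ¬ ((1:Int) = level) := by omega
  have a2 : ¬ ((2:Int) = level) := by omega
  have a3 : ¬ ((3:Int) = level) := by omega
  have a4 : ¬ ((4:Int) = level) := by omega
  have a5 : ¬ ((5:Int) = level) := by omega
  have hn0 : ¬ ((0:Int) < level) := by omega
  have hn1 : ¬ ((1:Int) < level) := by omega
  have hn2 : ¬ ((2:Int) < level) := by omega
  have hn3 : ¬ ((3:Int) < level) := by omega
  have hn4 : ¬ ((4:Int) < level) := by omega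
  have hn5 : ¬ ((5:Int) < level) := by omega
  simp [get_required_xp, levelXptables, PySem.Dict.contains, PySem.Dict.get?, PySem.Dict.keys,
        PySem.List.sorted, PySem.List.insertBy, List.findSome?, a0,a1,a2,a3,a4,a5,
        hn0,hn1,hn2,hn3,hn4,hn5]

lemma lt_zero_b (level : Int) (h : level < 0) : get_required_xp_alt level = none := by
  have k0 : ¬ ((0:Int) ≤ level) := by omega
  have k1 : ¬ ((1:Int) ≤ level) := by omega
  have k3 : ¬ ((3:Int) ≤ level) := by omega
  simp [get_required_xp_alt, bisR, skeys, k0, k1, k3]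

-- ===== VERDICT (by name: the statement is the Claim_ definition above) =====
theorem get_required_xp_spec : Claim_equal_get_required_xp := by
  intro level _
  unfold Spec_get_required_xp
  by_cases h1 : level < 0
  · rw [lt_zero_a level h1, lt_zero_b level h1]
  · by_cases h2 : 5 < level
    · rw [ge_five_a level h2, ge_five_b level h2]
    · interval_cases level <;> decide
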